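-- pv_equiv track=rewrite | github.com/ielab/Reproduce-chunking-2026 | src/encoders/late_encoder.py | _get_document_range_by_doc_id
-- ===== SOURCE A (Python) =====
-- from typing import List, Dict, Tuple
--
-- def _get_document_range_by_doc_id(doc_id_list: List[str]) -> Dict[str, Dict[str, int]]:
--     """
--     For this method, we must ensure that chunks split from one document have the same doc id.
--     :return {doc_id: {'start': int, 'end': int}, ...}
--     """
--
--     document_range = {}
--     for idx, doc_id in enumerate(doc_id_list):
--         if doc_id not in document_range:
--             document_range[doc_id] = {'start': idx, 'end': idx+1}
--         else:
--             document_range[doc_id]['end'] = idx + 1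
--
--     return document_range
-- ===== SOURCE B (Python) =====
-- from typing import List, Dict
--
--
-- def _get_document_range_by_doc_id(doc_id_list: List[str]) -> Dict[str, Dict[str, int]]:
--     # Two separate passes: a forward pass records each doc_id's first index
--     # (in first-occurrence order), a reverse pass records last index + 1.
--     starts = {}
--     for idx, doc_id in enumerate(doc_id_list):
--         if doc_id not in starts:
--             starts[doc_id] = idx
--     ends = {}
--     for idx, doc_id in reversed(list(enumerate(doc_id_list))):
--         if doc_id not in ends:
--             ends[doc_id] = idx + 1
--     return {doc_id: {'start': s, 'end': ends[doc_id]} for doc_id, s in starts.items()}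
-- ===== Notes on version B (the rewrite author's own statement) =====
-- stated objective: alternative
-- what changed: Replaces the single fold that mutates each entry's 'end' on every repeat occurrence with two independent first-seen passes (forward for starts, reversed for ends) merged at the end in first-occurrence order.
import Mathlib
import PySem

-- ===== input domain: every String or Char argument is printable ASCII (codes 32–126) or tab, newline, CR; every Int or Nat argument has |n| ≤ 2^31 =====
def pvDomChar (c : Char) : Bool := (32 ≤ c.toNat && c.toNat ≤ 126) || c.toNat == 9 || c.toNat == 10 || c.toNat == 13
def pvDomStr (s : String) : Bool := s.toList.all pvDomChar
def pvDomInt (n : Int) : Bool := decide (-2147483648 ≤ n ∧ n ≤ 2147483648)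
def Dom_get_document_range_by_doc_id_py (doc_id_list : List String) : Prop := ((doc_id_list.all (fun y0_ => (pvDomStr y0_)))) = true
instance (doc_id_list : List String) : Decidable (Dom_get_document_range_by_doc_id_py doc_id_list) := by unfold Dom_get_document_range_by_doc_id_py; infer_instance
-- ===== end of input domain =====

-- B replaces A's single mutate-as-you-go fold by two independent first-seen passes
-- (forward for starts, reversed for ends) merged in first-occurrence order (objective: alternative).


-- ===== PORT A =====
-- A: one fold over enumerate(doc_id_list); new key → insert {'start': idx, 'end': idx+1},
-- seen key → overwrite its inner 'end' (ported as insert of the updated inner dict, d[k]['end'] = idx+1).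
def get_document_range_by_doc_id_py (doc_id_list : List String) : List (String × List (String × Int)) :=
  let document_range : PySem.Dict String (PySem.Dict String Int) :=
    (PySem.List.enumerate doc_id_list).foldl
      (fun d p =>
        if d.contains p.2 = false then
          d.insert p.2 (PySem.Dict.ofList [("start", p.1), ("end", p.1 + 1)])
        else
          d.insert p.2 ((d.getD p.2 PySem.Dict.empty).insert "end" (p.1 + 1)))
      PySem.Dict.empty
  document_range.items.map (fun q => (q.1, q.2.items))

-- ===== PORT B =====
def get_document_range_by_doc_id_py_alt (doc_id_list : List String) : List (String × List (String × Int)) :=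
  let starts : PySem.Dict String Int :=
    (PySem.List.enumerate doc_id_list).foldl
      (fun d p => if d.contains p.2 = false then d.insert p.2 p.1 else d) PySem.Dict.empty
  let ends : PySem.Dict String Int :=
    ((PySem.List.enumerate doc_id_list).reverse).foldl
      (fun d p => if d.contains p.2 = false then d.insert p.2 (p.1 + 1) else d) PySem.Dict.empty
  -- ends[doc_id]: the key is always present (every starts key occurs in the list); getD is exact here
  starts.items.map (fun q => (q.1, [("start", q.2), ("end", ends.getD q.1 0)]))

-- ===== PRECONDITION & SPEC =====
def Spec_get_document_range_by_doc_id_py (doc_id_list : List String) (out : List (String × List (String × Int))) : Prop := out = get_document_range_by_doc_id_py_alt doc_id_list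
instance (doc_id_list : List String) (out : List (String × List (String × Int))) : Decidable (Spec_get_document_range_by_doc_id_py doc_id_list out) := by unfold Spec_get_document_range_by_doc_id_py; infer_instance

-- ===== CLAIM (what is proved, stated in full; the proofs are below) =====
def Claim_equal_get_document_range_by_doc_id_py : Prop := ∀ (doc_id_list : List String), Dom_get_document_range_by_doc_id_py doc_id_list → Spec_get_document_range_by_doc_id_py doc_id_list (get_document_range_by_doc_id_py doc_id_list)

-- ===== LEMMAS AND PROOFS =====

-- last occurrence's index + 1 of y in xs (0 if absent): proof-side characterisation of the 'end' field
def pvLastEnd (xs : List String) (y : String) : Int :=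
  (((PySem.List.enumerate xs).reverse.find? (fun p => p.2 == y)).map (fun p => p.1 + 1)).getD 0

-- A's fold accumulator
def pvAfold (xs : List String) : PySem.Dict String (PySem.Dict String Int) :=
  (PySem.List.enumerate xs).foldl
    (fun d p =>
      if d.contains p.2 = false then
        d.insert p.2 (PySem.Dict.ofList [("start", p.1), ("end", p.1 + 1)])
      else
        d.insert p.2 ((d.getD p.2 PySem.Dict.empty).insert "end" (p.1 + 1)))
    PySem.Dict.empty

-- B's starts accumulator
def pvSfold (xs : List String) : PySem.Dict String Int :=
  (PySem.List.enumerate xs).foldl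
    (fun d p => if d.contains p.2 = false then d.insert p.2 p.1 else d) PySem.Dict.empty

lemma pv_ends_get? (l : List (Int × String)) (acc : PySem.Dict String Int) (y : String) :
    (l.foldl (fun d p => if d.contains p.2 = false then d.insert p.2 (p.1 + 1) else d) acc).get? y
      = (acc.get? y).or ((l.find? (fun p => p.2 == y)).map (fun p => p.1 + 1)) := by
  induction l generalizing acc with
  | nil => simp
  | cons p t ih =>
    simp only [List.foldl_cons]
    by_cases hy : p.2 = y
    · subst hy
      rw [List.find?_cons_of_pos (by simp)]
      by_cases hc : acc.contains p.2 = false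
      · simp only [hc, Bool.true_eq_false, Bool.false_eq_true, reduceIte]
        rw [ih, PySem.Dict.get?_insert_self]
        have h1 : (acc.get? p.2).isSome = false := by
          rw [← PySem.Dict.contains_eq_isSome_get?]; exact hc
        have hnone : acc.get? p.2 = none := by
          cases h : acc.get? p.2 with
          | none => rfl
          | some v => rw [h] at h1; simp at h1
        simp [hnone]
      · simp only [hc, Bool.true_eq_false, Bool.false_eq_true, reduceIte]
        rw [ih]
        have h1 : (acc.get? p.2).isSome := by
          rw [← PySem.Dict.contains_eq_isSome_get?]; simpa using hc
        obtain ⟨v, hv⟩ := Option.isSome_iff_exists.mp h1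
        simp [hv]
    · rw [List.find?_cons_of_neg (by simp [hy])]
      by_cases hc : acc.contains p.2 = false
      · simp only [hc, Bool.true_eq_false, Bool.false_eq_true, reduceIte]
        rw [ih, PySem.Dict.get?_insert_of_ne _ _ (fun h : y = p.2 => hy h.symm)]
      · simp only [hc, Bool.true_eq_false, Bool.false_eq_true, reduceIte]
        rw [ih]

lemma pv_lastEnd_snoc (xs : List String) (x y : String) :
    pvLastEnd (xs ++ [x]) y
      = if x = y then (xs.length : Int) + 1 else pvLastEnd xs y := by
  unfold pvLastEnd
  rw [PySem.List.enumerate_append]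
  simp only [List.reverse_append]
  by_cases h : x = y <;> simp [PySem.List.enumerate, List.find?, h]

lemma pv_nodup_keys_Sfold (xs : List String) : (pvSfold xs).keys.Nodup := by
  unfold pvSfold
  induction xs using List.reverseRecOn with
  | nil => simp [PySem.List.enumerate]
  | append_singleton t x ih =>
    rw [PySem.List.enumerate_append, List.foldl_append]
    simp only [PySem.List.enumerate, List.foldl_cons, List.foldl_nil]
    by_cases hc : ((PySem.List.enumerate t).foldl
        (fun d p => if d.contains p.2 = false then d.insert p.2 p.1 else d)
        PySem.Dict.empty).contains x = false
    · simp only [hc, Bool.true_eq_false, Bool.false_eq_true, reduceIte]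
      rw [PySem.Dict.keys_insert_of_not_contains _ _ hc]
      refine List.Nodup.append ih (by simp) ?_
      intro a ha hb
      simp only [List.mem_singleton] at hb
      subst hb
      rw [← PySem.Dict.contains_iff_mem_keys] at ha
      simp [ha] at hc
    · simp [hc, ih]

-- the main invariant: A's accumulator items are B's starts items decorated with start/lastEnd
lemma pv_main (xs : List String) :
    (pvAfold xs).items
      = (pvSfold xs).items.map
          (fun q => (q.1, PySem.Dict.ofList [("start", q.2), ("end", pvLastEnd xs q.1)])) := by
  induction xs using List.reverseRecOn with
  | nil => rfl
  | append_singleton t x ih =>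
    have hkeys : (pvAfold t).keys = (pvSfold t).keys := by
      simp only [PySem.Dict.keys, ih, List.map_map]
      rfl
    have hstep : ∀ (y : String),
        (pvAfold t).contains y = (pvSfold t).contains y := by
      intro y
      rw [PySem.Dict.contains_eq_decide_mem_keys, PySem.Dict.contains_eq_decide_mem_keys, hkeys]
    have hA : pvAfold (t ++ [x])
        = (if (pvAfold t).contains x = false then
            (pvAfold t).insert x (PySem.Dict.ofList [("start", (t.length : Int)), ("end", (t.length : Int) + 1)])
          else
            (pvAfold t).insert x (((pvAfold t).getD x PySem.Dict.empty).insert "end" ((t.length : Int) + 1))) := by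
      unfold pvAfold
      rw [PySem.List.enumerate_append, List.foldl_append]
      simp [PySem.List.enumerate]
    have hS : pvSfold (t ++ [x])
        = (if (pvSfold t).contains x = false then (pvSfold t).insert x (t.length : Int) else pvSfold t) := by
      unfold pvSfold
      rw [PySem.List.enumerate_append, List.foldl_append]
      simp [PySem.List.enumerate]
    by_cases hc : (pvSfold t).contains x = false
    · -- fresh key: both sides append
      rw [hA, hS]
      rw [hstep x]
      simp only [hc, Bool.true_eq_false, Bool.false_eq_true, reduceIte]
      rw [PySem.Dict.items_insert_of_not_contains _ _ (by rw [hstep x]; exact hc),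
          PySem.Dict.items_insert_of_not_contains _ _ hc]
      rw [ih, List.map_append]
      congr 1
      · apply List.map_congr_left
        intro q hq
        have hqx : q.1 ≠ x := by
          intro h
          have : x ∈ (pvSfold t).keys := by
            rw [← h]
            exact PySem.Dict.mem_keys_of_mem_items _ hq
          rw [← PySem.Dict.contains_iff_mem_keys] at this
          simp [this] at hc
        rw [pv_lastEnd_snoc, if_neg (fun h : x = q.1 => hqx h.symm)]
      · simp [pv_lastEnd_snoc]
    · -- seen key: A overwrites the inner 'end'; starts unchanged
      rw [hA, hS]
      rw [hstep x]
      simp only [hc, Bool.true_eq_false, Bool.false_eq_true, reduceIte]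
      -- the existing entry of x in starts
      have hxmem : x ∈ (pvSfold t).keys := by
        rw [← PySem.Dict.contains_iff_mem_keys]
        simpa using hc
      rw [PySem.Dict.items_insert_of_contains _ _ (by rw [hstep x]; simpa using hc)]
      rw [ih, List.map_map]
      apply List.map_congr_left
      intro q hq
      by_cases hqx : q.1 = x
      · have hgd : (pvAfold t).getD x PySem.Dict.empty
            = PySem.Dict.ofList [("start", q.2), ("end", pvLastEnd t q.1)] := by
          subst hqx
          apply PySem.Dict.getD_of_mem_items
          · rw [ih]
            exact List.mem_map_of_mem hq
          · rw [hkeys]; exact pv_nodup_keys_Sfold t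
        simp only [Function.comp, hqx, beq_self_eq_true, reduceIte, hgd]
        rw [pv_lastEnd_snoc]
        subst hqx
        simp
        rfl
      · simp only [Function.comp, beq_iff_eq, hqx, reduceIte]
        rw [pv_lastEnd_snoc, if_neg (fun h : x = q.1 => hqx h.symm)]

-- ===== VERDICT (by name: the statement is the Claim_ definition above) =====
theorem get_document_range_by_doc_id_py_spec : Claim_equal_get_document_range_by_doc_id_py := by
  intro xs _
  unfold Spec_get_document_range_by_doc_id_py
  unfold get_document_range_by_doc_id_py get_document_range_by_doc_id_py_alt
  simp only []
  rw [show ((PySem.List.enumerate xs).foldl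
      (fun d p =>
        if d.contains p.2 = false then
          d.insert p.2 (PySem.Dict.ofList [("start", p.1), ("end", p.1 + 1)])
        else
          d.insert p.2 ((d.getD p.2 PySem.Dict.empty).insert "end" (p.1 + 1)))
      PySem.Dict.empty) = pvAfold xs from rfl]
  rw [pv_main, List.map_map]
  apply List.map_congr_left
  intro q hq
  have hends : ((((PySem.List.enumerate xs).reverse).foldl
      (fun d p => if d.contains p.2 = false then d.insert p.2 (p.1 + 1) else d)
      PySem.Dict.empty)).getD q.1 0 = pvLastEnd xs q.1 := by
    rw [PySem.Dict.getD_eq_get?_getD, pv_ends_get?]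
    simp [pvLastEnd]
  simp only [Function.comp]
  rw [hends]
  rfl
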